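-- pv_equiv track=rewrite | github.com/BeckSchemenauer/RunCoach | running_specific/InfoExtractor/all_purpose/all_purpose_test.py | split_colon_tokens
-- ===== SOURCE A (Python) =====
-- def split_colon_tokens(sentence):
--     """Splits tokens containing colons into separate parts, keeping the colon as a separate token."""
--     split_words = []
--     for word in sentence.split():
--         if ':' in word:
--             parts = word.split(':')
--             split_words.extend([part + (':' if i < len(parts) - 1 else '') for i, part in enumerate(parts)])
--         else:
--             split_words.append(word)
--     return ' '.join(split_words)
-- ===== SOURCE B (Python) =====
-- def split_colon_tokens(sentence):
--     """Splits tokens containing colons into separate parts, keeping the colon as a separate token."""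
--     return ' '.join(
--         ''.join(c + (' ' if c == ':' else '') for c in word)
--         for word in sentence.split()
--     )
-- ===== Notes on version B (the rewrite author's own statement) =====
-- stated objective: alternative
-- what changed: B drops A's per-word split-on-colon/enumerate/index-conditional/extend rebuild and instead makes one character pass per word, emitting each character followed by a space whenever the character is a colon, then joins the words.
import Mathlib
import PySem

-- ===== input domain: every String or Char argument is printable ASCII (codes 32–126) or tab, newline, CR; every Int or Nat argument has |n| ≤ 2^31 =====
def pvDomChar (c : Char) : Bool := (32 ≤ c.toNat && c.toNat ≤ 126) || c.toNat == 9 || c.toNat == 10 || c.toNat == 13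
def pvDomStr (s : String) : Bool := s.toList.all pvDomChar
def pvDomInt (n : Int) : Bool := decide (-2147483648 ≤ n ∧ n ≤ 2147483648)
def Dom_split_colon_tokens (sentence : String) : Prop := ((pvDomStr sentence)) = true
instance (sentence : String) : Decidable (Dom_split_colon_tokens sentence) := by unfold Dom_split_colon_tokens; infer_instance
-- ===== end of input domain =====

-- B replaces A's per-word split(':')/enumerate/extend rebuild by a single per-character pass
-- that emits each character followed by a space after every colon (objective: alternative).

-- ===== PORT A =====
def split_colon_tokens (sentence : String) : String :=
  let split_words := (PySem.Str.split₀ sentence).foldl (fun split_words word =>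
    if PySem.Str.isIn ":" word then
      let parts := (PySem.Str.split? word ":").getD []
      split_words ++ (PySem.List.enumerate parts).map
        (fun ip => ip.2 ++ (if ip.1 < (parts.length : Int) - 1 then ":" else ""))
    else split_words ++ [word]) []
  PySem.Str.join " " split_words

-- ===== PORT B =====
def split_colon_tokens_alt (sentence : String) : String :=
  PySem.Str.join " " ((PySem.Str.split₀ sentence).map (fun word =>
    PySem.Str.join "" (word.toList.map (fun c =>
      String.ofList [c] ++ (if c == ':' then " " else "")))))

-- ===== PRECONDITION & SPEC =====
def Spec_split_colon_tokens (sentence : String) (out : String) : Prop := out = split_colon_tokens_alt sentence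
instance (sentence : String) (out : String) : Decidable (Spec_split_colon_tokens sentence out) := by unfold Spec_split_colon_tokens; infer_instance

-- ===== CLAIM (what is proved, stated in full; the proofs are below) =====
def Claim_equal_split_colon_tokens : Prop := ∀ (sentence : String), Dom_split_colon_tokens sentence → Spec_split_colon_tokens sentence (split_colon_tokens sentence)

-- ===== LEMMAS AND PROOFS =====

/-- Simple structural splitter on ':' (proof-only reference model for `PySem.Chars.splitOn`). -/
def pvSimpleSplit : List Char → List (List Char)
  | [] => [[]]
  | c :: rest =>
    if c = ':' then [] :: pvSimpleSplit rest
    else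
      match pvSimpleSplit rest with
      | [] => [[c]]
      | p :: ps => (c :: p) :: ps

/-- Per-character expansion both programs compute, at the `List Char` level. -/
def pvExpand (cs : List Char) : List Char := cs.flatMap (fun c => if c = ':' then [':', ' '] else [c])

/-- Prepend onto the head part. -/
def pvConsHead (x : List Char) : List (List Char) → List (List Char)
  | [] => [x]
  | p :: ps => (x ++ p) :: ps

theorem pvSimpleSplit_ne_nil (cs : List Char) : pvSimpleSplit cs ≠ [] := by
  cases cs with
  | nil => simp [pvSimpleSplit]
  | cons c rest =>
    simp only [pvSimpleSplit]
    split_ifs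
    · simp
    · cases h : pvSimpleSplit rest <;> simp

theorem pvConsHead_append (x y : List Char) (l : List (List Char)) :
    pvConsHead (x ++ y) l = pvConsHead x (pvConsHead y l) := by
  cases l <;> simp [pvConsHead]

theorem pv_go_eq : ∀ (fuel : Nat) (w cur : List Char) (acc : List (List Char)),
    w.length < fuel →
    PySem.Chars.splitOn.go [':'] fuel w cur acc = acc.reverse ++ pvConsHead cur.reverse (pvSimpleSplit w) := by
  intro fuel
  induction fuel with
  | zero => intro w cur acc h; omega
  | succ fuel ih =>
    intro w cur acc h
    cases w with
    | nil =>
      rw [PySem.Chars.splitOn.go.eq_def]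
      simp [pvSimpleSplit, pvConsHead]
    | cons c rest =>
      rw [PySem.Chars.splitOn.go.eq_def]
      simp only [List.isPrefixOf, List.length_cons] at *
      by_cases hc : c = ':'
      · subst hc
        simp only [BEq.rfl, Bool.true_and, if_pos,
          List.drop_succ_cons, List.length_nil, List.drop_zero]
        rw [ih rest [] (cur.reverse :: acc) (by omega)]
        simp [pvSimpleSplit]
        cases h' : pvSimpleSplit rest with
        | nil => exact absurd h' (pvSimpleSplit_ne_nil rest)
        | cons p ps => simp [pvConsHead]
      · have hbeq : ((':' : Char) == c) = false := by
          simp [BEq.beq]; exact fun hh => hc hh.symm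
        simp only [hbeq, Bool.false_and, Bool.false_eq_true, if_false]
        rw [ih rest (c :: cur) acc (by omega)]
        have : pvSimpleSplit (c :: rest) = pvConsHead [c] (pvSimpleSplit rest) := by
          simp only [pvSimpleSplit, if_neg hc]
          cases h' : pvSimpleSplit rest <;> simp [pvConsHead]
        rw [this, List.reverse_cons, pvConsHead_append]

theorem pv_splitOn_colon (w : List Char) : PySem.Chars.splitOn w [':'] = pvSimpleSplit w := by
  unfold PySem.Chars.splitOn
  rw [pv_go_eq (w.length + 1) w [] [] (by omega)]
  simp only [List.reverse_nil, List.nil_append]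
  cases h : pvSimpleSplit w with
  | nil => exact absurd h (pvSimpleSplit_ne_nil w)
  | cons p ps => simp [pvConsHead]

theorem pv_join_cons_head (sep : List Char) (c : Char) (p : List Char) (ps : List (List Char)) :
    PySem.Chars.join sep ((c :: p) :: ps) = c :: PySem.Chars.join sep (p :: ps) := by
  cases ps with
  | nil => simp [PySem.Chars.join_singleton]
  | cons q r => simp [PySem.Chars.join_cons_cons]

theorem pv_inter_simpleSplit (cs : List Char) :
    PySem.Chars.join [':', ' '] (pvSimpleSplit cs) = pvExpand cs := by
  induction cs with
  | nil => simp [pvSimpleSplit, pvExpand, PySem.Chars.join_singleton]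
  | cons c rest ih =>
    by_cases hc : c = ':'
    · subst hc
      rw [show pvSimpleSplit (':' :: rest) = [] :: pvSimpleSplit rest by simp [pvSimpleSplit]]
      cases h' : pvSimpleSplit rest with
      | nil => exact absurd h' (pvSimpleSplit_ne_nil rest)
      | cons p ps =>
        rw [PySem.Chars.join_cons_cons]
        rw [h'] at ih
        rw [ih]
        simp [pvExpand]
    · simp only [pvSimpleSplit, if_neg hc]
      cases h' : pvSimpleSplit rest with
      | nil => exact absurd h' (pvSimpleSplit_ne_nil rest)
      | cons p ps =>
        rw [pv_join_cons_head]
        rw [h'] at ih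
        rw [ih]
        simp [pvExpand, hc]

theorem pv_enumerate_cons {α : Type} (x : α) (t : List α) (s : Int) :
    PySem.List.enumerate (x :: t) s = (s, x) :: PySem.List.enumerate t (s + 1) := rfl

def pvAnnot : List String → List (List Char)
  | [] => []
  | [p] => [p.toList]
  | p :: q :: r => (p.toList ++ [':']) :: pvAnnot (q :: r)

theorem pv_enumerate_map_annot (parts : List String) : ∀ (s : Int),
    (PySem.List.enumerate parts s).map
      (fun ip => (ip.2 ++ (if ip.1 < s + (parts.length : Int) - 1 then ":" else "")).toList) =
    pvAnnot parts := by
  induction parts with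
  | nil => intro s; simp [PySem.List.enumerate, pvAnnot]
  | cons p rest ih =>
    intro s
    cases rest with
    | nil =>
      simp only [PySem.List.enumerate, List.map_cons, List.map_nil,
        List.length_cons, List.length_nil, pvAnnot]
      rw [if_neg (by push_cast; omega)]
      simp
    | cons q r =>
      rw [pv_enumerate_cons, List.map_cons]
      simp only [pvAnnot]
      refine List.cons_eq_cons.mpr ⟨?_, ?_⟩
      · rw [if_pos (by push_cast [List.length_cons]; omega)]
        simp [String.toList_append]
      · rw [← ih (s + 1)]
        apply List.map_congr_left
        intro ip _
        have : (if ip.1 < s + ((p :: q :: r).length : Int) - 1 then (":" : String) else "") =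
            (if ip.1 < (s + 1) + ((q :: r).length : Int) - 1 then ":" else "") := by
          congr 1
          simp only [List.length_cons, eq_iff_iff]
          push_cast
          omega
        rw [this]

theorem pv_annot_join (parts : List String) :
    PySem.Chars.join [' '] (pvAnnot parts) =
    PySem.Chars.join [':', ' '] (parts.map String.toList) := by
  induction parts with
  | nil => simp [pvAnnot, PySem.Chars.join_nil]
  | cons p rest ih =>
    cases rest with
    | nil => simp [pvAnnot, PySem.Chars.join_singleton]
    | cons q r =>
      simp only [pvAnnot, List.map_cons]
      have h1 : ∃ a b, pvAnnot (q :: r) = a :: b := by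
        cases r <;> simp [pvAnnot]
      obtain ⟨a, b, hab⟩ := h1
      rw [hab, PySem.Chars.join_cons_cons, ← hab, ih, PySem.Chars.join_cons_cons]
      simp [List.append_assoc]

theorem pv_join_nil_flatten (l : List (List Char)) :
    PySem.Chars.join [] l = l.flatten := by
  induction l with
  | nil => simp [PySem.Chars.join_nil]
  | cons x r ih =>
    cases r with
    | nil => simp [PySem.Chars.join_singleton]
    | cons y t => rw [PySem.Chars.join_cons_cons, ih]; simp

/-- B's per-word value, at the char level, is `pvExpand`. -/
theorem pv_bword (w : String) :
    (PySem.Str.join "" (w.toList.map (fun c =>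
      String.ofList [c] ++ (if c == ':' then " " else "")))).toList = pvExpand w.toList := by
  unfold PySem.Str.join
  rw [String.toList_ofList]
  have : (w.toList.map (fun c => String.ofList [c] ++ (if c == ':' then " " else ""))).map String.toList
      = w.toList.map (fun c => if c = ':' then [':', ' '] else [c]) := by
    simp only [List.map_map]
    apply List.map_congr_left
    intro c _
    by_cases hc : c = ':' <;> simp [hc]
  simp only [String.toList_empty] at *
  rw [this, pv_join_nil_flatten, pvExpand, List.flatMap]

theorem pv_expand_of_not_mem (cs : List Char) (h : ':' ∉ cs) : pvExpand cs = cs := by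
  induction cs with
  | nil => simp [pvExpand]
  | cons c rest ih =>
    simp only [List.mem_cons, not_or] at h
    simp only [pvExpand, List.flatMap_cons] at *
    rw [if_neg (fun hc => h.1 hc.symm)]
    simp [ih h.2]

/-- A's per-word token list. -/
def pvAWord (word : String) : List String :=
  if PySem.Str.isIn ":" word then
    let parts := (PySem.Str.split? word ":").getD []
    (PySem.List.enumerate parts).map
      (fun ip => ip.2 ++ (if ip.1 < (parts.length : Int) - 1 then ":" else ""))
  else [word]

theorem pv_parts_eq (word : String) :
    (PySem.Str.split? word ":").getD [] = (pvSimpleSplit word.toList).map String.ofList := by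
  unfold PySem.Str.split?
  simp [PySem.Chars.split?, pv_splitOn_colon]

theorem pvAWord_ne_nil (word : String) : pvAWord word ≠ [] := by
  unfold pvAWord
  split_ifs with h
  · rw [pv_parts_eq]
    cases h' : pvSimpleSplit word.toList with
    | nil => exact absurd h' (pvSimpleSplit_ne_nil word.toList)
    | cons p ps => simp
  · simp

theorem pv_aword_join (word : String) :
    PySem.Chars.join [' '] ((pvAWord word).map String.toList) = pvExpand word.toList := by
  unfold pvAWord
  split_ifs with h
  · simp only [pv_parts_eq]
    rw [List.map_map]
    simp only [Function.comp_def, String.toList_append]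
    have h0 := pv_enumerate_map_annot ((pvSimpleSplit word.toList).map String.ofList) 0
    simp only [zero_add, String.toList_append] at h0
    rw [h0, pv_annot_join]
    have : ((pvSimpleSplit word.toList).map String.ofList).map String.toList = pvSimpleSplit word.toList := by
      simp [List.map_map, Function.comp_def, String.toList_ofList]
    rw [this, pv_inter_simpleSplit]
  · have hni : ':' ∉ word.toList := by
      have := (PySem.Str.isIn_iff_infix ":" word)
      have h2 : ¬ ((":" : String).toList <:+: word.toList) := by
        intro hcontra
        exact h (this.mpr hcontra)
      intro hmem
      exact h2 (by simpa [List.singleton_infix_iff] using hmem)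
    simp only [List.map_cons, List.map_nil, PySem.Chars.join_singleton]
    exact (pv_expand_of_not_mem word.toList hni).symm

theorem pv_join_append (sep : List Char) (l1 l2 : List (List Char))
    (h1 : l1 ≠ []) (h2 : l2 ≠ []) :
    PySem.Chars.join sep (l1 ++ l2) = PySem.Chars.join sep l1 ++ sep ++ PySem.Chars.join sep l2 := by
  induction l1 with
  | nil => exact absurd rfl h1
  | cons x r ih =>
    cases r with
    | nil =>
      cases l2 with
      | nil => exact absurd rfl h2
      | cons y t => simp [PySem.Chars.join_cons_cons, PySem.Chars.join_singleton]
    | cons y t =>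
      have : (x :: y :: t) ++ l2 = x :: ((y :: t) ++ l2) := by simp
      rw [this]
      have hc : ∃ a b, (y :: t) ++ l2 = a :: b := by cases l2 <;> simp
      obtain ⟨a, b, hab⟩ := hc
      rw [hab, PySem.Chars.join_cons_cons, ← hab, ih (by simp), PySem.Chars.join_cons_cons]
      simp [List.append_assoc]

theorem pv_join_flatMap (ws : List String) :
    PySem.Chars.join [' '] ((ws.flatMap pvAWord).map String.toList) =
    PySem.Chars.join [' '] (ws.map (fun w => pvExpand w.toList)) := by
  induction ws with
  | nil => simp
  | cons w rest ih =>
    rw [List.flatMap_cons, List.map_append]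
    cases rest with
    | nil => simp [pv_aword_join]
    | cons w2 r2 =>
      have hA : (pvAWord w).map String.toList ≠ [] := by
        simp [pvAWord_ne_nil w]
      have hB : ((w2 :: r2).flatMap pvAWord).map String.toList ≠ [] := by
        rw [List.flatMap_cons, List.map_append]
        intro hcontra
        rcases List.append_eq_nil_iff.mp hcontra with ⟨hl, _⟩
        exact (by simp [pvAWord_ne_nil w2] : (pvAWord w2).map String.toList ≠ []) hl
      rw [pv_join_append [' '] _ _ hA hB, pv_aword_join, ih]
      simp [PySem.Chars.join_cons_cons]

-- ===== VERDICT (by name: the statement is the Claim_ definition above) =====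
theorem split_colon_tokens_spec : Claim_equal_split_colon_tokens := by
  intro sentence _
  unfold Spec_split_colon_tokens split_colon_tokens split_colon_tokens_alt
  have hfold : ((PySem.Str.split₀ sentence).foldl (fun split_words word =>
      if PySem.Str.isIn ":" word then
        let parts := (PySem.Str.split? word ":").getD []
        split_words ++ (PySem.List.enumerate parts).map
          (fun ip => ip.2 ++ (if ip.1 < (parts.length : Int) - 1 then ":" else ""))
      else split_words ++ [word]) []) = (PySem.Str.split₀ sentence).flatMap pvAWord := by
    have hfun : (fun (split_words : List String) (word : String) =>
        if PySem.Str.isIn ":" word then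
          let parts := (PySem.Str.split? word ":").getD []
          split_words ++ (PySem.List.enumerate parts).map
            (fun ip => ip.2 ++ (if ip.1 < (parts.length : Int) - 1 then ":" else ""))
        else split_words ++ [word]) = (fun split_words word => split_words ++ pvAWord word) := by
      funext split_words word
      unfold pvAWord
      split_ifs <;> rfl
    rw [hfun, PySem.List.foldl_append_eq_flatMap]
    simp
  rw [hfold]
  have topjoin : ∀ l : List String, PySem.Str.join " " l =
      String.ofList (PySem.Chars.join [' '] (l.map String.toList)) := by
    intro l
    unfold PySem.Str.join
    rw [show (" " : String).toList = [' '] by decide]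
  rw [topjoin, topjoin]
  congr 1
  rw [List.map_map]
  have hB : (PySem.Str.split₀ sentence).map (String.toList ∘ (fun word =>
      PySem.Str.join "" (word.toList.map (fun c =>
        String.ofList [c] ++ (if c == ':' then " " else ""))))) =
      (PySem.Str.split₀ sentence).map (fun w => pvExpand w.toList) := by
    apply List.map_congr_left
    intro w _
    simp only [Function.comp_def]
    exact pv_bword w
  rw [hB, pv_join_flatMap]
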